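-- pv_equiv track=rewrite | github.com/quyencodes/structy-py | 7-exhaustive_recursion/sub_synonyms.py | substitute_synonyms
-- ===== SOURCE A (Python) =====
-- def substitute_synonyms(sentence, synonyms):
--   if len(sentence) == 0:
--     return ['']
--
--   choices, remainder = get_choices(sentence, synonyms)
--
--   res = []
--   for choice in choices:
--     remaining_sentence = substitute_synonyms(remainder, synonyms)
--     for sentence in remaining_sentence:
--       temp = choice + ' ' + sentence if sentence != '' else choice
--       res.append(temp)
--   return res
--
-- def get_choices(sentence, synonyms):
--   words = sentence.split()
--   first_word = words[0]
--
--   if first_word in synonyms: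
--     other_words = synonyms[first_word]
--     return (other_words, ' '.join(words[1:]))
--   else:
--     return ([first_word], ' '.join(words[1:]))
-- ===== SOURCE B (Python) =====
-- def substitute_synonyms(sentence, synonyms):
--   words = sentence.split()
--   results = ['']
--   for word in reversed(words):
--     choices = synonyms[word] if word in synonyms else [word]
--     results = [c + ' ' + r if r != '' else c for c in choices for r in results]
--   return results
-- ===== Notes on version B (the rewrite author's own statement) =====
-- stated objective: alternative
-- what changed: B splits the sentence into words once and folds over them back-to-front, computing each suffix's result list exactly once, instead of A's recursion that re-computes the whole suffix result inside the loop over choices (once per choice) at every level. Pre_ excludes only sentences that are non-empty but all whitespace, where A raises IndexError (words[0] of an empty split) and returns nothing.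
import Mathlib
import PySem

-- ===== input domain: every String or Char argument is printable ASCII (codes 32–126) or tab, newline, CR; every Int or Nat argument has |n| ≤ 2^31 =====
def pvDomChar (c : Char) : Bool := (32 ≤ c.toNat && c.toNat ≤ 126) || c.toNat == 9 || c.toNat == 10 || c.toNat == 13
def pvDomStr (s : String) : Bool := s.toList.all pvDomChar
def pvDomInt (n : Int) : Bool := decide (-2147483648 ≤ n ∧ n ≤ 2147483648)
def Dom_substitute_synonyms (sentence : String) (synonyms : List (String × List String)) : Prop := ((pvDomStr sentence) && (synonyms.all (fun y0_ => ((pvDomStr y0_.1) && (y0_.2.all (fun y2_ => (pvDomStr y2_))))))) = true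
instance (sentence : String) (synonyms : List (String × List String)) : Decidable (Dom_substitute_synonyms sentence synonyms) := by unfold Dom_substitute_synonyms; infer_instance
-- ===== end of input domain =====

-- B replaces A's recursion (which recomputes the whole suffix result once per choice at every
-- level) by one split and a single back-to-front fold over the words, so each suffix's result
-- list is computed exactly once.

-- synonyms dict bridged to the List Char level both ports work on
def pvToCharsSyn (synonyms : List (String × List String)) : PySem.Dict (List Char) (List (List Char)) :=
  ⟨synonyms.map (fun p => (p.1.toList, p.2.map String.toList))⟩

-- ===== PORT A =====
-- Termination lemmas for the port's well-founded recursion (cited by name in decreasing_by).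
-- split₀.go with a nonempty accumulator = accumulator prefix ++ run with empty accumulator
theorem pvGoAcc (s : List Char) (cur : List Char) (acc : List (List Char)) :
    PySem.Chars.split₀.go s cur acc = acc.reverse ++ PySem.Chars.split₀.go s cur [] := by
  induction s generalizing cur acc with
  | nil =>
    by_cases h : cur.isEmpty <;> simp [PySem.Chars.split₀.go, h]
  | cons c rest ih =>
    simp only [PySem.Chars.split₀.go]
    by_cases hsp : PySem.Chars.isspace c
    · by_cases h : cur.isEmpty
      · simp only [hsp, h, if_true]
        exact ih [] acc
      · simp only [hsp, h, if_true, Bool.false_eq_true, if_false]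
        rw [ih [] (cur.reverse :: acc), ih [] [cur.reverse]]
        simp
    · simp only [hsp, Bool.false_eq_true, if_false]
      exact ih (c :: cur) acc

-- total length of the joined words never exceeds the scanned input (plus the pending word)
-- length of 'w' joined in front of more words
theorem pvLenJoinCons (w : List Char) (L : List (List Char)) :
    (PySem.Chars.join [' '] (w :: L)).length ≤ w.length + 1 + (PySem.Chars.join [' '] L).length := by
  cases L with
  | nil => simp [PySem.Chars.join_singleton]
  | cons b l => simp [PySem.Chars.join_cons_cons]; omega

theorem pvLenJoinGo (s : List Char) (cur : List Char) :
    (PySem.Chars.join [' '] (PySem.Chars.split₀.go s cur [])).length ≤ cur.length + s.length := by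
  induction s generalizing cur with
  | nil =>
    by_cases h : cur.isEmpty <;>
      simp [PySem.Chars.split₀.go, h, PySem.Chars.join_nil, PySem.Chars.join_singleton]
  | cons c rest ih =>
    simp only [PySem.Chars.split₀.go]
    by_cases hsp : PySem.Chars.isspace c
    · by_cases h : cur.isEmpty
      · simp only [hsp, h, if_true]
        have := ih []
        simp only [List.length_nil] at this
        simp only [List.length_cons]
        omega
      · simp only [hsp, h, if_true, Bool.false_eq_true, if_false]
        rw [pvGoAcc rest [] [cur.reverse]]
        simp only [List.reverse_cons, List.reverse_nil, List.nil_append, List.singleton_append]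
        have h1 := pvLenJoinCons cur.reverse (PySem.Chars.split₀.go rest [] [])
        have h2 := ih []
        simp only [List.length_nil, List.length_reverse, List.length_cons] at *
        omega
    · simp only [hsp, Bool.false_eq_true, if_false]
      have := ih (c :: cur)
      simp only [List.length_cons] at *
      omega

theorem pvLenJoinTailLt (cs : List Char) (h : cs ≠ []) (w : List Char) (rest : List (List Char))
    (hs : PySem.Chars.split₀ cs = w :: rest) :
    (PySem.Chars.join [' '] rest).length < cs.length := by
  have hb := pvLenJoinGo cs []
  rw [show PySem.Chars.split₀.go cs [] [] = PySem.Chars.split₀ cs from rfl, hs] at hb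
  have hcs : 0 < cs.length := List.length_pos_iff.mpr h
  cases rest with
  | nil => simpa [PySem.Chars.join_nil] using hcs
  | cons b l =>
    rw [PySem.Chars.join_cons_cons] at hb
    simp only [List.length_nil, List.length_append, List.length_cons] at hb ⊢
    omega

-- recursive worker of A's port, at the List Char level
def pvSubstGo (cs : List Char) (syns : PySem.Dict (List Char) (List (List Char))) : List (List Char) :=
  if hne : cs = [] then [[]]
  else
    match hs : PySem.Chars.split₀ cs with
    | [] => []   -- Python raises IndexError (words[0] of an empty split); excluded by Pre_
    | w :: rest =>
      let choices := match PySem.Dict.get? syns w with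
        | some other_words => other_words
        | none => [w]
      let remainder := PySem.Chars.join [' '] rest
      choices.foldl (fun res choice =>
        (pvSubstGo remainder syns).foldl (fun res t =>
          res ++ [if t ≠ [] then choice ++ ' ' :: t else choice]) res) []
termination_by cs.length
decreasing_by exact pvLenJoinTailLt cs hne w rest hs

def substitute_synonyms (sentence : String) (synonyms : List (String × List String)) : List String :=
  (pvSubstGo sentence.toList (pvToCharsSyn synonyms)).map String.ofList

-- ===== PORT B =====
-- one step of B's fold: prepend `word`'s choices to every partial suffix result
def pvStep (syns : PySem.Dict (List Char) (List (List Char))) (results : List (List Char))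
    (word : List Char) : List (List Char) :=
  (match PySem.Dict.get? syns word with
    | some other_words => other_words
    | none => [word]).flatMap
    (fun c => results.map (fun r => if r ≠ [] then c ++ ' ' :: r else c))

def substitute_synonyms_alt (sentence : String) (synonyms : List (String × List String)) : List String :=
  let syns := pvToCharsSyn synonyms
  (((PySem.Chars.split₀ sentence.toList).reverse).foldl (pvStep syns) [[]]).map String.ofList

-- ===== PRECONDITION & SPEC =====
-- Pre_ excludes exactly the sentences that are non-empty but all whitespace: there A's
-- `words[0]` raises IndexError (it returns no value).
def Pre_substitute_synonyms (sentence : String) (synonyms : List (String × List String)) : Prop :=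
  sentence.toList = [] ∨ sentence.toList.any (fun c => !PySem.Chars.isspace c) = true
instance (sentence : String) (synonyms : List (String × List String)) : Decidable (Pre_substitute_synonyms sentence synonyms) := by unfold Pre_substitute_synonyms; infer_instance

def pvWitness_substitute_synonyms : String × (List (String × List String)) :=
  ("a b", [("a", ["x", "y"])])

def Spec_substitute_synonyms (sentence : String) (synonyms : List (String × List String)) (out : List String) : Prop := out = substitute_synonyms_alt sentence synonyms
instance (sentence : String) (synonyms : List (String × List String)) (out : List String) : Decidable (Spec_substitute_synonyms sentence synonyms out) := by unfold Spec_substitute_synonyms; infer_instance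

-- ===== CLAIM (what is proved, stated in full; the proofs are below) =====
def Claim_equal_substitute_synonyms : Prop := ∀ (sentence : String) (synonyms : List (String × List String)), Dom_substitute_synonyms sentence synonyms → Pre_substitute_synonyms sentence synonyms → Spec_substitute_synonyms sentence synonyms (substitute_synonyms sentence synonyms)

-- ===== LEMMAS AND PROOFS =====

-- every word produced by split₀ is non-empty and whitespace-free
theorem pvGoWords (s : List Char) (cur : List Char)
    (hcur : ∀ c ∈ cur, PySem.Chars.isspace c = false) :
    ∀ w ∈ PySem.Chars.split₀.go s cur [], w ≠ [] ∧ ∀ c ∈ w, PySem.Chars.isspace c = false := by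
  induction s generalizing cur with
  | nil =>
    by_cases h : cur.isEmpty
    · simp [PySem.Chars.split₀.go, h]
    · intro w hw
      simp only [PySem.Chars.split₀.go, h, Bool.false_eq_true, if_false, List.reverse_cons,
        List.reverse_nil, List.nil_append, List.mem_singleton] at hw
      subst hw
      refine ⟨by simpa [List.isEmpty_iff] using h, fun c hc => hcur c (List.mem_reverse.mp hc)⟩
  | cons c rest ih =>
    simp only [PySem.Chars.split₀.go]
    by_cases hsp : PySem.Chars.isspace c
    · by_cases h : cur.isEmpty
      · simp only [hsp, h, if_true]
        exact ih [] (by simp)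
      · simp only [hsp, h, if_true, Bool.false_eq_true, if_false]
        rw [pvGoAcc rest [] [cur.reverse]]
        intro w hw
        rcases List.mem_append.mp hw with hw | hw
        · simp only [List.reverse_cons, List.reverse_nil, List.nil_append,
            List.mem_singleton] at hw
          subst hw
          refine ⟨by simpa [List.isEmpty_iff] using h, fun d hd => hcur d (List.mem_reverse.mp hd)⟩
        · exact ih [] (by simp) w hw
    · simp only [hsp, Bool.false_eq_true, if_false]
      refine ih (c :: cur) ?_
      intro d hd
      rcases List.mem_cons.mp hd with rfl | hd
      · simpa using hsp
      · exact hcur d hd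

-- a run with a non-empty pending word is non-empty
theorem pvGoNeNilOfCur (s : List Char) (cur : List Char) (hcur : cur ≠ []) :
    PySem.Chars.split₀.go s cur [] ≠ [] := by
  induction s generalizing cur with
  | nil => simp [PySem.Chars.split₀.go, List.isEmpty_iff, hcur]
  | cons c rest ih =>
    simp only [PySem.Chars.split₀.go]
    by_cases hsp : PySem.Chars.isspace c
    · simp only [hsp, if_true, List.isEmpty_iff, hcur, if_false]
      rw [pvGoAcc rest [] [cur.reverse]]
      simp
    · simp only [hsp, Bool.false_eq_true, if_false]
      exact ih (c :: cur) (List.cons_ne_nil c cur)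

-- a sentence with a non-space character splits into at least one word
theorem pvGoNeNil (s : List Char) (cur : List Char) (hw : ∃ c ∈ s, PySem.Chars.isspace c = false) :
    PySem.Chars.split₀.go s cur [] ≠ [] := by
  induction s generalizing cur with
  | nil => simp at hw
  | cons c rest ih =>
    obtain ⟨d, hd, hds⟩ := hw
    simp only [PySem.Chars.split₀.go]
    by_cases hsp : PySem.Chars.isspace c
    · have hdr : d ∈ rest := by
        rcases List.mem_cons.mp hd with rfl | hd
        · rw [hsp] at hds; cases hds
        · exact hd
      by_cases h : cur.isEmpty
      · simp only [hsp, h, if_true]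
        exact ih [] ⟨d, hdr, hds⟩
      · simp only [hsp, h, if_true, Bool.false_eq_true, if_false]
        rw [pvGoAcc rest [] [cur.reverse]]
        simp
    · simp only [hsp, Bool.false_eq_true, if_false]
      exact pvGoNeNilOfCur rest (c :: cur) (List.cons_ne_nil c cur)

-- scanning a whitespace-free chunk just accumulates it
theorem pvGoConsume (w : List Char) (hw : ∀ c ∈ w, PySem.Chars.isspace c = false)
    (t cur : List Char) (acc : List (List Char)) :
    PySem.Chars.split₀.go (w ++ t) cur acc = PySem.Chars.split₀.go t (w.reverse ++ cur) acc := by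
  induction w generalizing cur with
  | nil => simp
  | cons c w' ih =>
    have hc : PySem.Chars.isspace c = false := hw c (List.mem_cons_self ..)
    simp only [List.cons_append, PySem.Chars.split₀.go, hc, Bool.false_eq_true, if_false]
    rw [ih (fun d hd => hw d (List.mem_cons_of_mem c hd)) (c :: cur)]
    simp [List.append_assoc]

-- round trip: splitting the space-joined word list gives back the word list
theorem pvSplitJoin (ws : List (List Char))
    (hws : ∀ w ∈ ws, w ≠ [] ∧ ∀ c ∈ w, PySem.Chars.isspace c = false) :
    PySem.Chars.split₀ (PySem.Chars.join [' '] ws) = ws := by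
  induction ws with
  | nil => simp [PySem.Chars.join_nil]; rfl
  | cons w rest ih =>
    have hwne : w ≠ [] := (hws w (List.mem_cons_self ..)).1
    have hwsp : ∀ c ∈ w, PySem.Chars.isspace c = false := (hws w (List.mem_cons_self ..)).2
    have hwE : w.isEmpty = false := by simpa [List.isEmpty_iff] using hwne
    cases rest with
    | nil =>
      show PySem.Chars.split₀.go (PySem.Chars.join [' '] [w]) [] [] = [w]
      rw [PySem.Chars.join_singleton, show w = w ++ [] from (List.append_nil w).symm,
        pvGoConsume w hwsp [] [] []]
      simp [PySem.Chars.split₀.go, hwE]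
    | cons b l =>
      show PySem.Chars.split₀.go (PySem.Chars.join [' '] (w :: b :: l)) [] [] = w :: b :: l
      rw [PySem.Chars.join_cons_cons, List.append_assoc, pvGoConsume w hwsp _ [] []]
      simp only [List.singleton_append, PySem.Chars.split₀.go,
        show PySem.Chars.isspace ' ' = true from rfl, if_true, List.append_nil,
        List.isEmpty_reverse, hwE, Bool.false_eq_true, if_false, List.reverse_reverse]
      rw [pvGoAcc _ [] [w]]
      have : PySem.Chars.split₀.go (PySem.Chars.join [' '] (b :: l)) [] [] = b :: l :=
        ih (fun x hx => hws x (List.mem_cons_of_mem w hx))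
      simp [this]

-- one unfolding of A's recursion, expressed through B's step function
theorem pvStepLemma (cs : List Char) (syns : PySem.Dict (List Char) (List (List Char)))
    (hne : cs ≠ []) (w : List Char) (rest : List (List Char))
    (hs : PySem.Chars.split₀ cs = w :: rest)
    (hrec : pvSubstGo (PySem.Chars.join [' '] rest) syns = rest.reverse.foldl (pvStep syns) [[]]) :
    pvSubstGo cs syns = (PySem.Chars.split₀ cs).reverse.foldl (pvStep syns) [[]] := by
  rw [pvSubstGo, dif_neg hne]
  rw [hs]
  simp only [hrec]
  simp only [PySem.List.foldl_append_singleton_eq_map, PySem.List.foldl_append_eq_flatMap]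
  rw [List.reverse_cons, List.foldl_append]
  simp [pvStep]

-- the core equivalence, on canonical (joined) sentences
theorem pvMain (syns : PySem.Dict (List Char) (List (List Char))) (ws : List (List Char))
    (hws : ∀ w ∈ ws, w ≠ [] ∧ ∀ c ∈ w, PySem.Chars.isspace c = false) :
    pvSubstGo (PySem.Chars.join [' '] ws) syns = ws.reverse.foldl (pvStep syns) [[]] := by
  induction ws with
  | nil =>
    rw [PySem.Chars.join_nil, pvSubstGo, dif_pos rfl]
    rfl
  | cons w rest ih =>
    have hwne : w ≠ [] := (hws w (List.mem_cons_self ..)).1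
    have hne : PySem.Chars.join [' '] (w :: rest) ≠ [] := by
      cases rest with
      | nil => simpa [PySem.Chars.join_singleton] using hwne
      | cons b l => simp [PySem.Chars.join_cons_cons, hwne]
    have hs := pvSplitJoin (w :: rest) hws
    have hrec := ih (fun x hx => hws x (List.mem_cons_of_mem w hx))
    rw [pvStepLemma _ syns hne w rest hs hrec, hs]

theorem pvTop (cs : List Char) (syns : PySem.Dict (List Char) (List (List Char)))
    (hpre : cs = [] ∨ ∃ c ∈ cs, PySem.Chars.isspace c = false) :
    pvSubstGo cs syns = (PySem.Chars.split₀ cs).reverse.foldl (pvStep syns) [[]] := by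
  by_cases hcs : cs = []
  · subst hcs
    rw [pvSubstGo, dif_pos rfl]
    rfl
  · have hex : ∃ c ∈ cs, PySem.Chars.isspace c = false := by
      rcases hpre with h | h
      · exact absurd h hcs
      · exact h
    have hnil : PySem.Chars.split₀ cs ≠ [] := pvGoNeNil cs [] hex
    obtain ⟨w, rest, hs⟩ : ∃ w rest, PySem.Chars.split₀ cs = w :: rest := by
      cases h : PySem.Chars.split₀ cs with
      | nil => exact absurd h hnil
      | cons a b => exact ⟨a, b, rfl⟩
    have hgood := pvGoWords cs [] (by simp)
    have hrec := pvMain syns rest (fun x hx => hgood x (by rw [show PySem.Chars.split₀.go cs [] [] = PySem.Chars.split₀ cs from rfl, hs]; exact List.mem_cons_of_mem w hx))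
    exact pvStepLemma cs syns hcs w rest hs hrec

-- ===== VERDICT (by name: the statement is the Claim_ definition above) =====
theorem substitute_synonyms_spec : Claim_equal_substitute_synonyms := by
  intro sentence synonyms _ hpre
  have hpre' : sentence.toList = [] ∨ ∃ c ∈ sentence.toList, PySem.Chars.isspace c = false := by
    rcases hpre with h | h
    · exact Or.inl h
    · obtain ⟨c, hc, hcb⟩ := List.any_eq_true.mp h
      exact Or.inr ⟨c, hc, by simpa using hcb⟩
  unfold Spec_substitute_synonyms substitute_synonyms substitute_synonyms_alt
  rw [pvTop sentence.toList (pvToCharsSyn synonyms) hpre']
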